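-- pv_equiv track=rewrite | github.com/lexilei/Sci-Retriever-V2 | sparse/bow_countpaper.py | bow_count
-- ===== SOURCE A (Python) =====
-- from collections import Counter
--
-- def bow_count(papers, words):
--     word_set = set(words)
--     bow_list = []
--
--     for paper in papers:
--         paper_words = paper.lower().split()
--         word_counts = Counter(paper_words)
--         bow_dict = {word: word_counts[word] for word in word_set}
--         bow_list.append(bow_dict)
--
--     return bow_list
-- ===== SOURCE B (Python) =====
-- def bow_count(papers, words):
--     # Sort-then-scan: keep only target tokens, sort them so equal tokens are
--     # adjacent, and run-length encode the sorted list instead of hash-counting.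
--     uniq = list(dict.fromkeys(words))
--     target = set(uniq)
--     bow_list = []
--     for paper in papers:
--         hits = sorted(t for t in paper.lower().split() if t in target)
--         runs = {}
--         i, n = 0, len(hits)
--         while i < n:
--             j = i + 1
--             while j < n and hits[j] == hits[i]:
--                 j += 1
--             runs[hits[i]] = j - i
--             i = j
--         bow_list.append({w: runs.get(w, 0) for w in uniq})
--     return bow_list
-- ===== Notes on version B (the rewrite author's own statement) =====
-- stated objective: alternative
-- what changed: Replaces the per-paper Counter hash index with a sort-then-scan algorithm: target tokens are filtered and sorted, counts are obtained by run-length encoding the sorted list with an explicit two-pointer scan.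
import Mathlib
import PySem

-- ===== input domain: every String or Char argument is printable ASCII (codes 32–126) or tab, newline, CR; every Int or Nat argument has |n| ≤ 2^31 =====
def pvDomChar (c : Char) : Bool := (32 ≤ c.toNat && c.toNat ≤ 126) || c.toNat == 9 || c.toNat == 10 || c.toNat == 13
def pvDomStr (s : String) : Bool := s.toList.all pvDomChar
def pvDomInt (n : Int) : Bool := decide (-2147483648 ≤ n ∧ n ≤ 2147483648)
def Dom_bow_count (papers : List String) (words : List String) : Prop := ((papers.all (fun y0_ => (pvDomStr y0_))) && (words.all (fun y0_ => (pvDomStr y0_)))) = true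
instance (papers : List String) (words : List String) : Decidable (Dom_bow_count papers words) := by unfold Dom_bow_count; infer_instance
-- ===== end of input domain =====

-- B replaces A's per-paper Counter hash index with sort-then-scan: filter the target tokens, sort them,
-- and run-length encode the sorted list (objective: alternative). Python iterates A's dict comprehension
-- over set(words) in hash order, which is not modelled; dict outputs are compared ignoring order, and
-- both ports emit the keys in first-occurrence order of `words`.

-- ===== PORT A =====
def bow_count (papers : List String) (words : List String) : List (List (String × Int)) :=
  let word_set : PySem.Set String := PySem.Set.ofList words
  papers.foldl (fun bow_list paper =>
    let paper_words := PySem.Str.split₀ (PySem.Str.lower paper)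
    let word_counts : PySem.Dict String Int := PySem.Dict.counter paper_words
    let bow_dict := word_set.foldl (fun d w => d.insert w (word_counts.getD w 0)) PySem.Dict.empty
    bow_list ++ [bow_dict.items]) []

-- ===== PORT B =====
-- the inner while loops of Source B: advance j past the run of tokens equal to hits[i],
-- record runs[hits[i]] = j - i, continue from j — on the remaining suffix of the sorted list
def pvRuns : List String → PySem.Dict String Int → PySem.Dict String Int
  | [], runs => runs
  | x :: rest, runs =>
      pvRuns (rest.dropWhile (fun t => t == x))
        (runs.insert x (((rest.takeWhile (fun t => t == x)).length : Int) + 1))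
  termination_by l _ => l.length
  decreasing_by
    exact Nat.lt_succ_of_le (List.Sublist.length_le (List.dropWhile_sublist _))

def bow_count_alt (papers : List String) (words : List String) : List (List (String × Int)) :=
  let uniq := PySem.List.dedup words
  let target : PySem.Set String := PySem.Set.ofList uniq
  papers.foldl (fun bow_list paper =>
    let hits := PySem.List.sorted
      ((PySem.Str.split₀ (PySem.Str.lower paper)).filter (fun t => PySem.Set.contains target t))
      (fun x => x) false
    let runs := pvRuns hits PySem.Dict.empty
    -- dict comprehension over the nodup list uniq: its items are these pairs in key order
    bow_list ++ [uniq.map (fun w => (w, runs.getD w 0))]) []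

-- ===== PRECONDITION & SPEC =====
def Spec_bow_count (papers : List String) (words : List String) (out : List (List (String × Int))) : Prop := out = bow_count_alt papers words
instance (papers : List String) (words : List String) (out : List (List (String × Int))) : Decidable (Spec_bow_count papers words out) := by unfold Spec_bow_count; infer_instance

-- ===== CLAIM (what is proved, stated in full; the proofs are below) =====
def Claim_equal_bow_count : Prop := ∀ (papers : List String) (words : List String), Dom_bow_count papers words → Spec_bow_count papers words (bow_count papers words)

-- ===== LEMMAS AND PROOFS =====

-- in a (≤)-sorted list, dropping the leading run of x drops every x
lemma pv_not_mem_dropWhile (x : String) (xs : List String)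
    (hle : ∀ y ∈ xs, x ≤ y) (hp : xs.Pairwise (· ≤ ·)) :
    x ∉ xs.dropWhile (fun t => t == x) := by
  induction xs with
  | nil => simp
  | cons y ys ih =>
    by_cases h : y = x
    · subst h
      rw [List.dropWhile_cons_of_pos (by simp)]
      exact ih (fun z hz => hle z (List.mem_cons_of_mem _ hz)) hp.of_cons
    · rw [List.dropWhile_cons_of_neg (by simpa using h)]
      intro hmem
      rcases List.mem_cons.mp hmem with rfl | hmem
      · exact h rfl
      · have hxy : x ≤ y := hle y (List.mem_cons_self)
        have hyx : y ≤ x := (List.pairwise_cons.mp hp).1 x hmem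
        exact h (le_antisymm hyx hxy)

-- run-length encoding of a sorted list: lookup = count
lemma pv_runs_getD (l : List String) (d : PySem.Dict String Int)
    (hs : l.Pairwise (· ≤ ·)) (w : String) :
    (pvRuns l d).getD w 0 = if w ∈ l then (l.count w : Int) else d.getD w 0 := by
  induction l, d using pvRuns.induct with
  | case1 d => simp [pvRuns]
  | case2 x rest d ih =>
    have hle : ∀ y ∈ rest, x ≤ y := (List.pairwise_cons.mp hs).1
    have hrest : rest.Pairwise (· ≤ ·) := hs.of_cons
    have hdrop : (rest.dropWhile (fun t => t == x)).Pairwise (· ≤ ·) :=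
      hrest.sublist (List.dropWhile_sublist _)
    have hxdrop : x ∉ rest.dropWhile (fun t => t == x) := pv_not_mem_dropWhile x rest hle hrest
    have hrun : ∀ y ∈ rest.takeWhile (fun t => t == x), y = x := by
      intro y hy
      simpa using List.mem_takeWhile_imp hy
    have hsplit : rest = rest.takeWhile (fun t => t == x) ++ rest.dropWhile (fun t => t == x) :=
      (List.takeWhile_append_dropWhile).symm
    rw [pvRuns, ih hdrop]
    by_cases hw : w = x
    · subst hw
      have hcr : rest.count w = (rest.takeWhile (fun t => t == w)).length := by
        conv_lhs => rw [hsplit]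
        rw [List.count_append, List.count_eq_zero.mpr hxdrop,
            List.count_eq_length.mpr (fun b hb => (hrun b hb).symm)]
        omega
      rw [if_neg hxdrop, PySem.Dict.getD_insert_self, if_pos List.mem_cons_self,
          List.count_cons_self, hcr]
      push_cast
      ring
    · have hwrun : w ∉ rest.takeWhile (fun t => t == x) := fun hmem => hw (hrun w hmem)
      have hcrest : rest.count w = (rest.dropWhile (fun t => t == x)).count w := by
        conv_lhs => rw [hsplit]
        rw [List.count_append, List.count_eq_zero.mpr hwrun, Nat.zero_add]
      rw [PySem.Dict.getD_insert_of_ne _ _ _ hw]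
      by_cases hwd : w ∈ rest.dropWhile (fun t => t == x)
      · have hwrest : w ∈ rest := List.Sublist.mem hwd (List.dropWhile_sublist _)
        rw [if_pos hwd, if_pos (List.mem_cons_of_mem _ hwrest), ← hcrest]
        simp [Ne.symm hw]
      · have hwrest : w ∉ rest := by
          intro hmem
          rw [hsplit] at hmem
          rcases List.mem_append.mp hmem with h | h
          · exact hwrun h
          · exact hwd h
        rw [if_neg hwd, if_neg (by simp [hw, hwrest])]

-- per-word agreement on one paper
lemma pv_word_eq (toks : List String) (words : List String) (w : String)
    (hw : w ∈ PySem.List.dedup words) :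
    (pvRuns (PySem.List.sorted
        (toks.filter (fun t => PySem.Set.contains (PySem.Set.ofList (PySem.List.dedup words)) t))
        (fun x => x) false) PySem.Dict.empty).getD w 0 = (toks.count w : Int) := by
  set p : String → Bool := fun t => PySem.Set.contains (PySem.Set.ofList (PySem.List.dedup words)) t with hp
  set hits := PySem.List.sorted (toks.filter p) (fun x => x) false with hhits
  have hsorted : hits.Pairwise (· ≤ ·) := PySem.List.sorted_pairwise (toks.filter p) (fun x => x)
  have hperm : hits.Perm (toks.filter p) := PySem.List.sorted_perm (toks.filter p) (fun x => x) false
  have hpw : p w = true := by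
    simp only [hp, PySem.Set.contains_eq_listContains, List.contains_iff_mem]
    simpa [PySem.Set.mem_ofList] using hw
  have hcount : hits.count w = toks.count w := by
    rw [hperm.count_eq, List.count_filter]
    simp [hpw]
  rw [pv_runs_getD hits PySem.Dict.empty hsorted w]
  by_cases hmem : w ∈ hits
  · simp [hmem, hcount]
  · have : toks.count w = 0 := by
      rw [← hcount]
      exact List.count_eq_zero.mpr hmem
    simp [hmem, this, PySem.Dict.getD_empty]

-- ===== VERDICT (by name: the statement is the Claim_ definition above) =====
theorem bow_count_spec : Claim_equal_bow_count := by
  intro papers words _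
  unfold Spec_bow_count bow_count bow_count_alt
  rw [PySem.List.foldl_append_singleton_eq_map, PySem.List.foldl_append_singleton_eq_map]
  refine congrArg _ (List.map_congr_left (fun paper _ => ?_))
  rw [PySem.Dict.items_foldl_insert_fresh _ _ _ _
        (fun a _ => PySem.Dict.contains_empty a)
        (by simp)]
  rw [show PySem.Set.ofList words = PySem.List.dedup words from (PySem.List.dedup_eq_ofList words).symm]
  refine List.map_congr_left (fun w hw => ?_)
  rw [PySem.Dict.getD_counter]
  exact congrArg _ (pv_word_eq _ words w hw).symm
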